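-- pv_equiv track=rewrite | github.com/hori49/BoardGameProject | rushHour.py | my_heuristic
-- ===== SOURCE A (Python) =====
-- def my_heuristic(curr_state):
--     if curr_state[2][5] == 'X':
--         return 0 # current state is the goal state
--     h_n = 0
--     for i in range(0, 6)[::-1]:
--         if curr_state[2][i] == 'X':
--             return h_n + 1 # vehicle X detected
--         elif curr_state[2][i] != '-':
--             h_n += 2 # +1 for a vehicle, +1 for a distance
--         else:
--             h_n += 1 # +1 for a distance
-- ===== SOURCE B (Python) =====
-- def my_heuristic(curr_state):
--     row = curr_state[2][:6]
--     p = 5 - row[::-1].index('X')  # rightmost 'X' in the row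
--     if p == 5:
--         return 0
--     return 1 + sum(1 if c == '-' else 2 for c in row[p + 1:])
-- ===== Notes on version B (the rewrite author's own statement) =====
-- stated objective: simpler
-- what changed: Replaces A's right-to-left accumulate-until-X scan with a two-phase decomposition: first locate the rightmost 'X' via reverse .index, then sum the weights of the suffix to its right in one comprehension.
-- outside the precondition, e.g. on my_heuristic(['------', '------', '------']): A returns None, B raises ValueError; on my_heuristic(['', '', 'X-']): A raises IndexError, B returns 1
import Mathlib
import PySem

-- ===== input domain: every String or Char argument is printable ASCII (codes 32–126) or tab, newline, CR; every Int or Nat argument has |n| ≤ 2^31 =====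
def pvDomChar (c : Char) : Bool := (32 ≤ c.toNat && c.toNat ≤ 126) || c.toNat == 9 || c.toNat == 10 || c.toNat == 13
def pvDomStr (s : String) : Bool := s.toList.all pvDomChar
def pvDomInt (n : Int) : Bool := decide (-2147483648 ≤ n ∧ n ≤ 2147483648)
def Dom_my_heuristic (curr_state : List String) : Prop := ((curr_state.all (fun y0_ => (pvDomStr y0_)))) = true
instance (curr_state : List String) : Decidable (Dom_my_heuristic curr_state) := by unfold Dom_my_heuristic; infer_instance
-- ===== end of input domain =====

-- B replaces A's accumulate-until-X scan by find-the-rightmost-X then sum-the-suffix (simpler decomposition, same cost).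

-- ===== PORT A =====
-- the for-loop of A: iterates over the (reversed) index list, accumulating h_n; [] = Python's fall-through (None, outside Pre_)
def myHeuristicLoopA (row : List Char) : List Int → Int → Int
  | [], _ => 0
  | i :: rest, h =>
    if PySem.List.pyGet? row i = some 'X' then h + 1
    else if PySem.List.pyGet? row i ≠ some '-' then myHeuristicLoopA row rest (h + 2)
    else myHeuristicLoopA row rest (h + 1)

def my_heuristic (curr_state : List String) : Int :=
  let row := ((PySem.List.pyGet? curr_state 2).getD "").toList
  if PySem.List.pyGet? row 5 = some 'X' then 0
  else myHeuristicLoopA row (PySem.List.pyRange 0 6 1).reverse 0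

-- ===== PORT B =====
def my_heuristic_alt (curr_state : List String) : Int :=
  let row := PySem.List.slice ((PySem.List.pyGet? curr_state 2).getD "").toList none (some 6)
  match PySem.List.index? row.reverse 'X' with
  | none => 0   -- Python B raises ValueError here; outside Pre_
  | some k =>
    let p : Int := 5 - (k : Int)
    if p = 5 then 0
    else 1 + (PySem.List.slice row (some (p + 1)) none).foldl
        (fun acc c => acc + (if c = '-' then (1 : Int) else 2)) 0

-- ===== PRECONDITION & SPEC =====
-- Pre_ excludes inputs where A raises IndexError (fewer than 3 rows, or row 2 shorter than 6)
-- and inputs with no 'X' among the first 6 cells of row 2, where A falls through returning None (not an int).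
def Pre_my_heuristic (curr_state : List String) : Prop :=
  3 ≤ curr_state.length ∧ 6 ≤ (curr_state.getD 2 "").toList.length ∧
    'X' ∈ (curr_state.getD 2 "").toList.take 6
instance (curr_state : List String) : Decidable (Pre_my_heuristic curr_state) := by
  unfold Pre_my_heuristic; infer_instance

def pvWitness_my_heuristic : List String := ["AA--B-", "--C-B-", "-X--D-"]

def Spec_my_heuristic (curr_state : List String) (out : Int) : Prop := out = my_heuristic_alt curr_state
instance (curr_state : List String) (out : Int) : Decidable (Spec_my_heuristic curr_state out) := by unfold Spec_my_heuristic; infer_instance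

-- ===== CLAIM (what is proved, stated in full; the proofs are below) =====
def Claim_equal_my_heuristic : Prop := ∀ (curr_state : List String), Dom_my_heuristic curr_state → Pre_my_heuristic curr_state → Spec_my_heuristic curr_state (my_heuristic curr_state)

-- ===== LEMMAS AND PROOFS =====
set_option maxHeartbeats 1000000 in
theorem myHeuristic_core (a b c d e f : Char) (rest : List Char)
    (hx : 'X' ∈ [a, b, c, d, e, f]) :
    (let row := a :: b :: c :: d :: e :: f :: rest
     if PySem.List.pyGet? row 5 = some 'X' then (0 : Int)
     else myHeuristicLoopA row (PySem.List.pyRange 0 6 1).reverse 0) =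
    (let row := PySem.List.slice (a :: b :: c :: d :: e :: f :: rest) none (some 6)
     match PySem.List.index? row.reverse 'X' with
     | none => 0
     | some k =>
       let p : Int := 5 - (k : Int)
       if p = 5 then 0
       else 1 + (PySem.List.slice row (some (p + 1)) none).foldl
           (fun acc c => acc + (if c = '-' then (1 : Int) else 2)) 0) := by
  have hs : PySem.List.slice (a::b::c::d::e::f::rest) none (some 6) = [a,b,c,d,e,f] := by
    rw [PySem.List.slice_to _ (by norm_num)]; simp
  have hg5 : PySem.List.pyGet? (a::b::c::d::e::f::rest) 5 = some f := by
    simp [PySem.List.pyGet?, PySem.List.pyIdx?]; rw [if_pos (by omega)]; simp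
  have hg4 : PySem.List.pyGet? (a::b::c::d::e::f::rest) 4 = some e := by
    simp [PySem.List.pyGet?, PySem.List.pyIdx?]; rw [if_pos (by omega)]; simp
  have hg3 : PySem.List.pyGet? (a::b::c::d::e::f::rest) 3 = some d := by
    simp [PySem.List.pyGet?, PySem.List.pyIdx?]; rw [if_pos (by omega)]; simp
  have hg2 : PySem.List.pyGet? (a::b::c::d::e::f::rest) 2 = some c := by
    simp [PySem.List.pyGet?, PySem.List.pyIdx?]; rw [if_pos (by omega)]; simp
  have hg1 : PySem.List.pyGet? (a::b::c::d::e::f::rest) 1 = some b := by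
    simp [PySem.List.pyGet?, PySem.List.pyIdx?]; rw [if_pos (by omega)]; simp
  have hg0 : PySem.List.pyGet? (a::b::c::d::e::f::rest) 0 = some a := by
    simp [PySem.List.pyGet?, PySem.List.pyIdx?]; rw [if_pos (by omega)]; simp
  have hr : (PySem.List.pyRange 0 6 1).reverse = ([5, 4, 3, 2, 1, 0] : List Int) := by decide
  simp only [hs, hr]
  simp only [myHeuristicLoopA, hg5, hg4, hg3, hg2, hg1, hg0, Option.some.injEq, ne_eq]
  have hrev : ([a,b,c,d,e,f] : List Char).reverse = [f,e,d,c,b,a] := by simp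
  simp only [hrev]
  by_cases hf : f = 'X'
  · subst hf
    rw [PySem.List.index?_cons_self]
    norm_num
  by_cases he : e = 'X'
  · subst he
    rw [PySem.List.index?_cons_of_ne _ hf, PySem.List.index?_cons_self]
    simp only [Option.map_some]
    norm_num [hf]
    rw [PySem.List.slice_from _ (by norm_num)]
    norm_num [List.foldl, show ((5:Int).toNat) = 5 from rfl]
    clear hs hg5 hg4 hg3 hg2 hg1 hg0 hrev hr hx
    split_ifs <;> first | omega | simp_all
  by_cases hd : d = 'X'
  · subst hd
    rw [PySem.List.index?_cons_of_ne _ hf, PySem.List.index?_cons_of_ne _ he,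
      PySem.List.index?_cons_self]
    simp only [Option.map_some]
    norm_num [hf, he]
    rw [PySem.List.slice_from _ (by norm_num)]
    norm_num [List.foldl, show ((4:Int).toNat) = 4 from rfl]
    clear hs hg5 hg4 hg3 hg2 hg1 hg0 hrev hr hx
    split_ifs <;> first | omega | simp_all
  by_cases hc : c = 'X'
  · subst hc
    rw [PySem.List.index?_cons_of_ne _ hf, PySem.List.index?_cons_of_ne _ he,
      PySem.List.index?_cons_of_ne _ hd, PySem.List.index?_cons_self]
    simp only [Option.map_some]
    norm_num [hf, he, hd]
    rw [PySem.List.slice_from _ (by norm_num)]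
    norm_num [List.foldl, show ((3:Int).toNat) = 3 from rfl]
    clear hs hg5 hg4 hg3 hg2 hg1 hg0 hrev hr hx
    split_ifs <;> first | omega | simp_all
  by_cases hb : b = 'X'
  · subst hb
    rw [PySem.List.index?_cons_of_ne _ hf, PySem.List.index?_cons_of_ne _ he,
      PySem.List.index?_cons_of_ne _ hd, PySem.List.index?_cons_of_ne _ hc,
      PySem.List.index?_cons_self]
    simp only [Option.map_some]
    norm_num [hf, he, hd, hc]
    rw [PySem.List.slice_from _ (by norm_num)]
    norm_num [List.foldl, show ((2:Int).toNat) = 2 from rfl]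
    clear hs hg5 hg4 hg3 hg2 hg1 hg0 hrev hr hx
    split_ifs <;> first | omega | simp_all
  by_cases ha : a = 'X'
  · subst ha
    rw [PySem.List.index?_cons_of_ne _ hf, PySem.List.index?_cons_of_ne _ he,
      PySem.List.index?_cons_of_ne _ hd, PySem.List.index?_cons_of_ne _ hc,
      PySem.List.index?_cons_of_ne _ hb, PySem.List.index?_cons_self]
    simp only [Option.map_some]
    norm_num [hf, he, hd, hc, hb]
    rw [PySem.List.slice_from _ (by norm_num)]
    norm_num [List.foldl, show ((1:Int).toNat) = 1 from rfl]
    clear hs hg5 hg4 hg3 hg2 hg1 hg0 hrev hr hx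
    split_ifs <;> first | omega | simp_all
  · simp only [List.mem_cons, List.not_mem_nil, or_false] at hx
    obtain h|h|h|h|h|h := hx
    · exact absurd h.symm ha
    · exact absurd h.symm hb
    · exact absurd h.symm hc
    · exact absurd h.symm hd
    · exact absurd h.symm he
    · exact absurd h.symm hf

theorem myHeuristic_getRow (cs : List String) :
    (PySem.List.pyGet? cs 2).getD "" = cs.getD 2 "" := by
  rcases cs with _ | ⟨x, _ | ⟨y, _ | ⟨z, t⟩⟩⟩
  · simp [PySem.List.pyGet?, PySem.List.pyIdx?]
  · simp [PySem.List.pyGet?, PySem.List.pyIdx?]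
  · simp [PySem.List.pyGet?, PySem.List.pyIdx?]
  · simp [PySem.List.pyGet?, PySem.List.pyIdx?]
    rw [if_pos (by omega)]
    simp

-- ===== VERDICT (by name: the statement is the Claim_ definition above) =====
theorem my_heuristic_spec : Claim_equal_my_heuristic := by
  intro cs _ hpre
  obtain ⟨h3, h6, hX⟩ := hpre
  unfold Spec_my_heuristic my_heuristic my_heuristic_alt
  rw [myHeuristic_getRow]
  generalize (cs.getD 2 "").toList = l at h6 hX ⊢
  rcases l with _ | ⟨a, l⟩; · simp at h6
  rcases l with _ | ⟨b, l⟩; · simp at h6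
  rcases l with _ | ⟨c, l⟩; · simp at h6
  rcases l with _ | ⟨d, l⟩; · simp at h6
  rcases l with _ | ⟨e, l⟩; · simp at h6
  rcases l with _ | ⟨f, rest⟩; · simp at h6
  simp only [List.take_succ_cons, List.take_zero, List.mem_cons, List.not_mem_nil,
    or_false] at hX
  exact myHeuristic_core a b c d e f rest (by simpa using hX)
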